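-- pv_equiv track=rewrite | github.com/tatiaris/tatiame-old | coding_problems/project_euler/49.py | optimize_arr
-- ===== SOURCE A (Python) =====
-- def optimize_arr(arr):
--     list_difs = []
--     list_nums_difs = []
--     modes = []
--     for i in range(len(arr)-1, -1, -1):
--         for j in range(i):
--             list_difs.append(arr[i] - arr[j])
--             list_nums_difs.append(arr[i])
--     for i in range(len(list_difs)-1):
--         if list_difs[i] in list_difs[i+1:]:
--             modes.append((list_nums_difs[i], list_difs[i]))
--     if modes == []:
--         opm_arr = arr
--     else:
--         opm_arr = []
--         while len(opm_arr) < 3: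
--             if len(modes) == 0:
--                 opm_arr = arr
--                 break
--             if modes[0][0]-(2*modes[0][1]) in arr:
--                 opm_arr = [modes[0][0], modes[0][0]-modes[0][1],  modes[0][0]-modes[0][1]-modes[0][1]]
--             modes.pop(0)
--     return opm_arr
-- ===== SOURCE B (Python) =====
-- def optimize_arr(arr):
--     members = set(arr)
--     seen = set()
--     result = arr
--     for i in range(len(arr)):
--         for j in range(i - 1, -1, -1):
--             d = arr[i] - arr[j]
--             if d in seen and arr[i] - 2 * d in members:
--                 result = [arr[i], arr[i] - d, arr[i] - 2 * d]
--             seen.add(d)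
--     return result
-- ===== Notes on version B (the rewrite author's own statement) =====
-- stated objective: faster
-- what changed: B never materializes the O(n^2) difference list: it traverses the pairs in the reverse of A's order keeping a set of differences already seen (= differences occurring later in A's order) and overwrites the answer on each qualifying pair, so the last overwrite is A's first match; no modes list, no inner slice scans, no while loop.
import Mathlib
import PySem

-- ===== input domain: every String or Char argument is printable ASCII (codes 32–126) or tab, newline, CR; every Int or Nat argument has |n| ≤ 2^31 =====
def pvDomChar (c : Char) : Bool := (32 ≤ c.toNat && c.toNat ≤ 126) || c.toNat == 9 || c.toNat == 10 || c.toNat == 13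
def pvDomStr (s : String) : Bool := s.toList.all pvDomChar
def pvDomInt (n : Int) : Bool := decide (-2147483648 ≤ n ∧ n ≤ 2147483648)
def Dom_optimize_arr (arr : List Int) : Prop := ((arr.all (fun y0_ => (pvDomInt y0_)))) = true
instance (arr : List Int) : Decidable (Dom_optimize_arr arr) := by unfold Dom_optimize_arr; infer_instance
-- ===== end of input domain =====

-- B traverses the index pairs in the REVERSE of A's order, keeping a set of differences already
-- seen (= differences occurring later in A's order) and overwriting the answer on each hit, so the
-- last overwrite is A's first match; no difference list, no slice scans, no modes list.
-- Objective: faster (B is O(n^2); A's slice-membership scans over the O(n^2) difference list are O(n^4)).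

-- ===== PORT A =====
-- A's 'while len(opm_arr) < 3' loop; modes loses its head each iteration, so recursion is on modes.
def optimizeWhileA (arr : List Int) (modes : List (Int × Int)) (opm : List Int) : List Int :=
  if opm.length < 3 then
    match modes with
    | [] => arr
    | m :: rest =>
        optimizeWhileA arr rest
          (if m.1 - 2 * m.2 ∈ arr then [m.1, m.1 - m.2, m.1 - m.2 - m.2] else opm)
  else opm

-- arr[i]/arr[j] are always in range here (0 ≤ j < i ≤ len-1), so pyGetD is exact.
def optimize_arr (arr : List Int) : List Int :=
  let st :=
    (PySem.List.pyRange ((arr.length : Int) - 1) (-1) (-1)).foldl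
      (fun (st : List Int × List Int) i =>
        (PySem.List.pyRange 0 i).foldl
          (fun st j =>
            (st.1 ++ [PySem.List.pyGetD arr i 0 - PySem.List.pyGetD arr j 0],
             st.2 ++ [PySem.List.pyGetD arr i 0]))
          st)
      ([], [])
  let list_difs := st.1
  let list_nums_difs := st.2
  let modes :=
    (PySem.List.pyRange 0 ((list_difs.length : Int) - 1)).foldl
      (fun (modes : List (Int × Int)) i =>
        if PySem.List.pyGetD list_difs i 0 ∈ PySem.List.slice list_difs (some (i + 1)) none then
          modes ++ [(PySem.List.pyGetD list_nums_difs i 0, PySem.List.pyGetD list_difs i 0)]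
        else modes)
      []
  if modes = [] then arr else optimizeWhileA arr modes []

-- ===== PORT B =====
-- state = (seen, result); the pair (i, j) is processed with i ascending and j descending,
-- the reverse of A's enumeration order.
def optimize_arr_alt (arr : List Int) : List Int :=
  let members := PySem.Set.ofList arr
  let st :=
    (PySem.List.pyRange 0 (arr.length : Int)).foldl
      (fun (st : PySem.Set Int × List Int) i =>
        (PySem.List.pyRange (i - 1) (-1) (-1)).foldl
          (fun (st : PySem.Set Int × List Int) j =>
            let d := PySem.List.pyGetD arr i 0 - PySem.List.pyGetD arr j 0
            (PySem.Set.add st.1 d,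
             if d ∈ st.1 ∧ PySem.List.pyGetD arr i 0 - 2 * d ∈ members then
               [PySem.List.pyGetD arr i 0, PySem.List.pyGetD arr i 0 - d,
                PySem.List.pyGetD arr i 0 - 2 * d]
             else st.2))
          st)
      (PySem.Set.empty, arr)
  st.2

-- ===== PRECONDITION & SPEC =====
def Spec_optimize_arr (arr : List Int) (out : List Int) : Prop := out = optimize_arr_alt arr
instance (arr : List Int) (out : List Int) : Decidable (Spec_optimize_arr arr out) := by unfold Spec_optimize_arr; infer_instance

-- ===== CLAIM (what is proved, stated in full; the proofs are below) =====
def Claim_equal_optimize_arr : Prop := ∀ (arr : List Int), Dom_optimize_arr arr → Spec_optimize_arr arr (optimize_arr arr)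

-- ===== LEMMAS AND PROOFS =====

-- the pair list (arr[i], arr[i]-arr[j]) in A's enumeration order
def pairsOf (arr : List Int) : List (Int × Int) :=
  (PySem.List.pyRange ((arr.length : Int) - 1) (-1) (-1)).flatMap
    (fun i =>
      (PySem.List.pyRange 0 i).map
        (fun j => (PySem.List.pyGetD arr i 0,
                   PySem.List.pyGetD arr i 0 - PySem.List.pyGetD arr j 0)))

-- A's modes list, characterised structurally: keep a pair whose difference reappears later.
def modesOf : List (Int × Int) → List (Int × Int)
  | [] => []
  | p :: rest => (if p.2 ∈ rest.map Prod.snd then [p] else []) ++ modesOf rest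

-- the common meaning of both programs: first pair with a later duplicate difference and a third member
def firstTriple (arr : List Int) : List (Int × Int) → List Int
  | [] => arr
  | (num, d) :: rest =>
      if d ∈ rest.map Prod.snd ∧ num - 2 * d ∈ arr then [num, num - d, num - 2 * d]
      else firstTriple arr rest

-- ---- A side ----
lemma pairs_build (arr : List Int) (L : List Int) (a b : List Int) :
    L.foldl
      (fun (st : List Int × List Int) i =>
        (PySem.List.pyRange 0 i).foldl
          (fun st j =>
            (st.1 ++ [PySem.List.pyGetD arr i 0 - PySem.List.pyGetD arr j 0],
             st.2 ++ [PySem.List.pyGetD arr i 0]))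
          st)
      (a, b)
    = (a ++ (L.flatMap (fun i =>
          (PySem.List.pyRange 0 i).map
            (fun j => (PySem.List.pyGetD arr i 0,
                       PySem.List.pyGetD arr i 0 - PySem.List.pyGetD arr j 0)))).map Prod.snd,
       b ++ (L.flatMap (fun i =>
          (PySem.List.pyRange 0 i).map
            (fun j => (PySem.List.pyGetD arr i 0,
                       PySem.List.pyGetD arr i 0 - PySem.List.pyGetD arr j 0)))).map Prod.fst) := by
  induction L generalizing a b with
  | nil => simp
  | cons i L ih =>
      simp only [List.foldl_cons]
      rw [PySem.List.foldl_prod_mk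
            (f := fun s j => s ++ [PySem.List.pyGetD arr i 0 - PySem.List.pyGetD arr j 0])
            (g := fun s j => s ++ [PySem.List.pyGetD arr i 0]),
          PySem.List.foldl_append_singleton_eq_map
            (f := fun j => PySem.List.pyGetD arr i 0 - PySem.List.pyGetD arr j 0),
          PySem.List.foldl_append_singleton_eq_map (f := fun _ => PySem.List.pyGetD arr i 0),
          ih]
      simp [List.map_map, Function.comp_def]

lemma modes_fold_nat (l : List (Int × Int)) (acc : List (Int × Int)) :
    (List.range (l.length - 1)).foldl
      (fun modes i =>
        if (l.map Prod.snd).getD i 0 ∈ (l.map Prod.snd).drop (i + 1) then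
          modes ++ [((l.map Prod.fst).getD i 0, (l.map Prod.snd).getD i 0)]
        else modes)
      acc
    = acc ++ modesOf l := by
  induction l generalizing acc with
  | nil => simp [modesOf]
  | cons p rest ih =>
      cases rest with
      | nil => simp [modesOf]
      | cons q t =>
          simp only [List.length_cons, Nat.add_sub_cancel, List.range_succ_eq_map,
            List.foldl_cons, List.foldl_map]
          have hfun :
              ∀ (modes : List (Int × Int)), ∀ i ∈ List.range t.length,
                (fun modes i =>
                  if ((p :: q :: t).map Prod.snd).getD i 0 ∈ ((p :: q :: t).map Prod.snd).drop (i + 1) then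
                    modes ++ [(((p :: q :: t).map Prod.fst).getD i 0, ((p :: q :: t).map Prod.snd).getD i 0)]
                  else modes) modes i.succ
                = (fun modes i =>
                  if ((q :: t).map Prod.snd).getD i 0 ∈ ((q :: t).map Prod.snd).drop (i + 1) then
                    modes ++ [(((q :: t).map Prod.fst).getD i 0, ((q :: t).map Prod.snd).getD i 0)]
                  else modes) modes i := by
            intro modes i _
            simp
          rw [PySem.List.foldl_congr_mem _ _ _ _ hfun]
          have : ((q :: t).length - 1) = t.length := by simp
          rw [← this, ih]
          simp only [List.map_cons, List.getD_cons_zero, List.drop_succ_cons, List.drop_zero]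
          simp only [modesOf, List.map_cons]
          split_ifs <;> simp

lemma whileA_done (arr : List Int) (modes : List (Int × Int)) (t : List Int)
    (h : ¬ t.length < 3) : optimizeWhileA arr modes t = t := by
  unfold optimizeWhileA
  simp [h]

lemma whileA_eq (arr : List Int) (modes : List (Int × Int)) :
    optimizeWhileA arr modes []
      = (match modes.find? (fun m => decide (m.1 - 2 * m.2 ∈ arr)) with
         | some m => [m.1, m.1 - m.2, m.1 - m.2 - m.2]
         | none => arr) := by
  induction modes with
  | nil => simp [optimizeWhileA]
  | cons m rest ih =>
      rw [optimizeWhileA]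
      by_cases h : m.1 - 2 * m.2 ∈ arr
      · simp only [h, if_true, List.length_nil, show (0:Nat) < 3 by omega, if_true]
        rw [whileA_done arr rest _ (by simp)]
        simp [h]
      · simp only [h, if_false, List.length_nil, show (0:Nat) < 3 by omega, if_true]
        rw [ih]
        simp [h]

lemma find_modesOf (arr : List Int) (l : List (Int × Int)) :
    (match (modesOf l).find? (fun m => decide (m.1 - 2 * m.2 ∈ arr)) with
     | some m => [m.1, m.1 - m.2, m.1 - m.2 - m.2]
     | none => arr)
    = firstTriple arr l := by
  induction l with
  | nil => simp [modesOf, firstTriple]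
  | cons p rest ih =>
      by_cases hp : p.2 ∈ rest.map Prod.snd
      · by_cases hq : p.1 - 2 * p.2 ∈ arr
        · simp [modesOf, firstTriple, hp, hq]
          ring
        · simpa [modesOf, firstTriple, hp, hq, List.find?_cons] using ih
      · simpa [modesOf, firstTriple, hp] using ih

lemma modesOf_nil_firstTriple (arr : List Int) (l : List (Int × Int))
    (h : modesOf l = []) : firstTriple arr l = arr := by
  rw [← find_modesOf, h]
  simp

-- the Int-indexed modes fold equals the structural modesOf
lemma modes_fold_int (l : List (Int × Int)) :
    (PySem.List.pyRange 0 (((l.map Prod.snd).length : Int) - 1)).foldl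
      (fun (modes : List (Int × Int)) i =>
        if PySem.List.pyGetD (l.map Prod.snd) i 0 ∈
            PySem.List.slice (l.map Prod.snd) (some (i + 1)) none then
          modes ++ [(PySem.List.pyGetD (l.map Prod.fst) i 0, PySem.List.pyGetD (l.map Prod.snd) i 0)]
        else modes)
      []
    = modesOf l := by
    cases l with
    | nil =>
        simp [modesOf]
    | cons p rest =>
        have : (((p :: rest).map Prod.snd).length : Int) - 1 = ((rest.length : Nat) : Int) := by
          simp
        rw [this, PySem.List.pyRange_zero_natCast, List.foldl_map]
        have hfun : ∀ (modes : List (Int × Int)), ∀ k ∈ List.range rest.length,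
            (if PySem.List.pyGetD ((p :: rest).map Prod.snd) (k : Int) 0 ∈
                PySem.List.slice ((p :: rest).map Prod.snd) (some ((k : Int) + 1)) none then
              modes ++ [(PySem.List.pyGetD ((p :: rest).map Prod.fst) (k : Int) 0,
                         PySem.List.pyGetD ((p :: rest).map Prod.snd) (k : Int) 0)]
            else modes)
            = (fun modes k =>
                if ((p :: rest).map Prod.snd).getD k 0 ∈ ((p :: rest).map Prod.snd).drop (k + 1) then
                  modes ++ [(((p :: rest).map Prod.fst).getD k 0, ((p :: rest).map Prod.snd).getD k 0)]
                else modes) modes k := by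
          intro modes k _
          have hsl : PySem.List.slice ((p :: rest).map Prod.snd) (some ((k : Int) + 1)) none
              = ((p :: rest).map Prod.snd).drop (k + 1) := by
            rw [PySem.List.slice_from _ (by positivity),
                show ((k : Int) + 1).toNat = k + 1 from by omega]
          rw [hsl, PySem.List.pyGetD_natCast, PySem.List.pyGetD_natCast]
        rw [PySem.List.foldl_congr_mem _ _ _ _ hfun]
        have : rest.length = (p :: rest).length - 1 := by simp
        rw [this, modes_fold_nat]
        simp

lemma A_to_firstTriple (arr : List Int) (l : List (Int × Int)) :
    (if modesOf l = [] then arr else optimizeWhileA arr (modesOf l) [])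
      = firstTriple arr l := by
  by_cases h : modesOf l = []
  · simp [h, modesOf_nil_firstTriple arr l h]
  · rw [if_neg h, whileA_eq, find_modesOf]

lemma optimize_arr_eq_firstTriple (arr : List Int) :
    optimize_arr arr = firstTriple arr (pairsOf arr) := by
  unfold optimize_arr
  rw [show (([], []) : List Int × List Int) = (([] : List Int), ([] : List Int)) from rfl,
      pairs_build]
  simp only [List.nil_append]
  rw [modes_fold_int]
  exact A_to_firstTriple arr _

-- ---- B side ----
-- B's inner-loop body as a function of the pair it processes
def bStep (members : List Int) (st : PySem.Set Int × List Int) (p : Int × Int) :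
    PySem.Set Int × List Int :=
  (PySem.Set.add st.1 p.2,
   if p.2 ∈ st.1 ∧ p.1 - 2 * p.2 ∈ members then [p.1, p.1 - p.2, p.1 - 2 * p.2] else st.2)

-- folding bStep over the REVERSED pair list computes firstTriple of the forward list,
-- and the seen-set collects exactly the differences of the list
lemma bStep_rev_fold (arr members : List Int) (hm : ∀ x, x ∈ members ↔ x ∈ arr)
    (l : List (Int × Int)) :
    (l.reverse.foldl (bStep members) (PySem.Set.empty, arr)).2 = firstTriple arr l ∧
    ∀ x, x ∈ (l.reverse.foldl (bStep members) (PySem.Set.empty, arr)).1 ↔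
      x ∈ l.map Prod.snd := by
  induction l with
  | nil =>
      constructor
      · rfl
      · intro x
        simp [PySem.Set.empty]
  | cons p rest ih =>
      obtain ⟨num, d⟩ := p
      obtain ⟨ih1, ih2⟩ := ih
      have hrw : ((num, d) :: rest).reverse = rest.reverse ++ [(num, d)] := by simp
      rw [hrw, List.foldl_append]
      set r := rest.reverse.foldl (bStep members) (PySem.Set.empty, arr) with hr
      have hcond : (d ∈ r.1 ∧ num - 2 * d ∈ members) ↔
          (d ∈ rest.map Prod.snd ∧ num - 2 * d ∈ arr) := by
        rw [ih2 d, hm]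
      constructor
      · show (bStep members r (num, d)).2 = firstTriple arr ((num, d) :: rest)
        simp only [bStep, firstTriple]
        rw [if_congr hcond rfl ih1]
      · intro x
        show x ∈ PySem.Set.add r.1 d ↔ _
        rw [PySem.Set.mem_add, ih2 x]
        simp [List.mem_cons]
        tauto

lemma reverse_pairsOf (arr : List Int) :
    (pairsOf arr).reverse
      = (PySem.List.pyRange 0 (arr.length : Int)).flatMap
          (fun i =>
            (PySem.List.pyRange (i - 1) (-1) (-1)).map
              (fun j => (PySem.List.pyGetD arr i 0,
                         PySem.List.pyGetD arr i 0 - PySem.List.pyGetD arr j 0))) := by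
  unfold pairsOf
  rw [List.reverse_flatMap]
  have houter : (PySem.List.pyRange ((arr.length : Int) - 1) (-1) (-1)).reverse
      = PySem.List.pyRange 0 (arr.length : Int) := by
    rw [PySem.List.pyRange_neg_one_eq_reverse, List.reverse_reverse]
    norm_num
  rw [houter]
  apply List.flatMap_congr
  intro i _
  simp only [Function.comp_apply]
  rw [PySem.List.pyRange_neg_one_eq_reverse]
  norm_num [List.map_reverse]

-- unfold the nested index fold of the B port into a fold of bStep over the pair list it visits
lemma alt_inner (arr members : List Int) (L : List Int) (init : PySem.Set Int × List Int) :
    L.foldl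
      (fun (st : PySem.Set Int × List Int) i =>
        (PySem.List.pyRange (i - 1) (-1) (-1)).foldl
          (fun (st : PySem.Set Int × List Int) j =>
            let d := PySem.List.pyGetD arr i 0 - PySem.List.pyGetD arr j 0
            (PySem.Set.add st.1 d,
             if d ∈ st.1 ∧ PySem.List.pyGetD arr i 0 - 2 * d ∈ members then
               [PySem.List.pyGetD arr i 0, PySem.List.pyGetD arr i 0 - d,
                PySem.List.pyGetD arr i 0 - 2 * d]
             else st.2))
          st)
      init
    = (L.flatMap (fun i => (PySem.List.pyRange (i - 1) (-1) (-1)).map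
        (fun j => (PySem.List.pyGetD arr i 0,
                   PySem.List.pyGetD arr i 0 - PySem.List.pyGetD arr j 0)))).foldl
        (bStep members) init := by
  induction L generalizing init with
  | nil => rfl
  | cons i L ih =>
      simp only [List.foldl_cons, List.flatMap_cons, List.foldl_append]
      rw [ih]
      congr 1
      rw [List.foldl_map]
      rfl

lemma alt_fold (arr : List Int) :
    optimize_arr_alt arr
      = ((pairsOf arr).reverse.foldl (bStep (PySem.Set.ofList arr))
          (PySem.Set.empty, arr)).2 := by
  rw [reverse_pairsOf]
  exact congrArg Prod.snd (alt_inner arr (PySem.Set.ofList arr) _ _)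

lemma optimize_arr_alt_eq_firstTriple (arr : List Int) :
    optimize_arr_alt arr = firstTriple arr (pairsOf arr) := by
  rw [alt_fold]
  exact (bStep_rev_fold arr (PySem.Set.ofList arr)
    (fun x => PySem.Set.mem_ofList arr x) (pairsOf arr)).1

-- ===== VERDICT (by name: the statement is the Claim_ definition above) =====
theorem optimize_arr_spec : Claim_equal_optimize_arr := by
  intro arr _
  unfold Spec_optimize_arr
  rw [optimize_arr_eq_firstTriple, optimize_arr_alt_eq_firstTriple]
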